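-- pv_equiv track=rewrite | github.com/markosolopenko/python | сode_wars/practice/algoritms_and_mathematic/sum_of_all_numbers_with_same_digits.py | sum_arrangements
-- ===== SOURCE A (Python) =====
-- from math import factorial
--
-- def sum_arrangements(num):
--     num_str = str(num)
--     length = len(num_str)
--     total = 0
--
--     c = factorial(length - 1) * sum(map(int, num_str))
--
--     for i in range(length):
--         total += c
--         c *= 10
--
--     return total
-- ===== SOURCE B (Python) =====
-- def sum_arrangements(num):
--     memo = {}
--
--     def rec(digits):
--         # (number of arrangements of `digits`, sum of their integer values)
--         if not digits:
--             return (1, 0)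
--         if digits in memo:
--             return memo[digits]
--         shift = 10 ** (len(digits) - 1)
--         cnt = 0
--         tot = 0
--         for i in range(len(digits)):
--             c, t = rec(digits[:i] + digits[i + 1:])
--             cnt += c
--             tot += digits[i] * shift * c + t
--         memo[digits] = (cnt, tot)
--         return (cnt, tot)
--
--     return rec(tuple(int(ch) for ch in str(num)))[1]
-- ===== Notes on version B (the rewrite author's own statement) =====
-- stated objective: alternative
-- what changed: Replaces A's factorial closed form plus repunit accumulation loop with a recursive enumerator that visits every arrangement of the digit string (choosing each remaining digit for the next position) and sums their integer values directly.
import Mathlib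
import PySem

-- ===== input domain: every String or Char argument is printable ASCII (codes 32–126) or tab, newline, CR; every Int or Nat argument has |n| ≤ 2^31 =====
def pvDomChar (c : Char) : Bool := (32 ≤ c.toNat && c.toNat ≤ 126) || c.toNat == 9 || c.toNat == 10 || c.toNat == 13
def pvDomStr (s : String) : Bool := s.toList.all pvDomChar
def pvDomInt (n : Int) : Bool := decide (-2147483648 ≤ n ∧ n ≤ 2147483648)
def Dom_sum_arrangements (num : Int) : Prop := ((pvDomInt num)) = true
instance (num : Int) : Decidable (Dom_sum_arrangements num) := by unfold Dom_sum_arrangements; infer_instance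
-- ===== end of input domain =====

-- B replaces A's factorial/repunit closed form by a memoised recursion that picks each remaining
-- digit for the leading position and accumulates (count, total) pairs (objective: alternative).

-- int(ch) for a single character ch (shared helper: both Pythons call int() on one character).
-- The .getD 0 default never fires under Pre_ (str of a nonnegative int has only digit chars).
def pyIntChar (ch : Char) : Int := (PySem.Int.ofChars? [ch]).getD 0

-- ===== PORT A =====
def sum_arrangements (num : Int) : Int :=
  let numStr := PySem.Int.toChars num          -- num_str = str(num)
  let length := numStr.length                  -- length = len(num_str)
  -- c = factorial(length - 1) * sum(map(int, num_str))   (length ≥ 1, so Nat subtraction is exact)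
  let c : Int := (Nat.factorial (length - 1) : Int) * (numStr.map pyIntChar).sum
  -- for i in range(length): total += c; c *= 10
  let st := (PySem.List.pyRange 0 (length : Int) 1).foldl
              (fun (st : Int × Int) _ => (st.1 + st.2, st.2 * 10)) ((0 : Int), c)
  st.1

-- ===== PORT B =====
-- rec(digits): (number of arrangements of digits, sum of their integer values), memoised in `memo`
-- (threaded explicitly here); fuel = number of digits makes the recursion structural and never
-- runs out, since every recursive call erases one digit.
def sum_arrangements_rec : Nat → List Int → PySem.Dict (List Int) (Int × Int) →
    ((Int × Int) × PySem.Dict (List Int) (Int × Int))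
  | 0, _, memo => ((1, 0), memo)               -- only ever reached with digits = [] (fuel invariant)
  | fuel + 1, digits, memo =>
    if digits.isEmpty then ((1, 0), memo)      -- if not digits: return (1, 0)
    else
      match memo.get? digits with              -- if digits in memo: return memo[digits]
      | some v => (v, memo)
      | none =>
        let shift : Int := 10 ^ (digits.length - 1)
        -- for i in range(len(digits)): c, t = rec(digits[:i] + digits[i+1:]); cnt += c; tot += digits[i]*shift*c + t
        let st := (PySem.List.pyRange 0 (digits.length : Int) 1).foldl
          (fun (st : Int × Int × PySem.Dict (List Int) (Int × Int)) i =>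
            let r := sum_arrangements_rec fuel (digits.eraseIdx i.toNat) st.2.2
            (st.1 + r.1.1, st.2.1 + PySem.List.pyGetD digits i 0 * shift * r.1.1 + r.1.2, r.2))
          ((0 : Int), (0 : Int), memo)
        ((st.1, st.2.1), st.2.2.insert digits (st.1, st.2.1))

def sum_arrangements_alt (num : Int) : Int :=
  let digits := (PySem.Int.toChars num).map pyIntChar   -- tuple(int(ch) for ch in str(num))
  (sum_arrangements_rec digits.length digits PySem.Dict.empty).1.2

-- ===== PRECONDITION & SPEC =====
-- Pre_ excludes negative num, where BOTH Pythons raise ValueError (int('-') on the sign character).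
def Pre_sum_arrangements (num : Int) : Prop := 0 ≤ num
instance (num : Int) : Decidable (Pre_sum_arrangements num) := by unfold Pre_sum_arrangements; infer_instance
def pvWitness_sum_arrangements : Int := (427)

def Spec_sum_arrangements (num : Int) (out : Int) : Prop := out = sum_arrangements_alt num
instance (num : Int) (out : Int) : Decidable (Spec_sum_arrangements num out) := by unfold Spec_sum_arrangements; infer_instance

-- ===== CLAIM (what is proved, stated in full; the proofs are below) =====
def Claim_equal_sum_arrangements : Prop := ∀ (num : Int), Dom_sum_arrangements num → Pre_sum_arrangements num → Spec_sum_arrangements num (sum_arrangements num)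

-- ===== LEMMAS AND PROOFS =====

-- rep n = 1 + 10 + … + 10^(n-1), the repunit A's loop accumulates
def pvRep : Nat → Int
  | 0 => 0
  | n + 1 => 1 + 10 * pvRep n

lemma pvRep_succ' (n : Nat) : pvRep (n + 1) = 10 ^ n + pvRep n := by
  induction n with
  | zero => simp [pvRep]
  | succ m ih =>
    calc pvRep (m + 1 + 1) = 1 + 10 * pvRep (m + 1) := rfl
      _ = 1 + 10 * (10 ^ m + pvRep m) := by rw [ih]
      _ = 10 ^ (m + 1) + (1 + 10 * pvRep m) := by ring
      _ = 10 ^ (m + 1) + pvRep (m + 1) := rfl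

-- K n: sum of place values over all arrangements of n digits, per unit of digit sum
def pvK : Nat → Int
  | 0 => 0
  | n + 1 => (Nat.factorial n : Int) * 10 ^ n + n * pvK n

lemma pvK_eq (n : Nat) : pvK n = (Nat.factorial (n - 1) : Int) * pvRep n := by
  induction n with
  | zero => simp [pvK, pvRep]
  | succ m ih =>
    cases m with
    | zero => simp [pvK, pvRep]
    | succ k =>
      simp only [pvK, Nat.succ_sub_one] at *
      rw [ih, pvRep_succ' (k + 1), Nat.factorial_succ]
      push_cast
      ring

-- A's loop: total += c; c *= 10, over any list, yields c * rep(length)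
lemma pvLoopA (l : List Int) (t c : Int) :
    (l.foldl (fun (st : Int × Int) _ => (st.1 + st.2, st.2 * 10)) (t, c)).1
      = t + c * pvRep l.length := by
  induction l generalizing t c with
  | nil => simp [pvRep]
  | cons x xs ih =>
    simp only [List.foldl_cons, List.length_cons, ih, pvRep]
    ring

lemma pvA_closed (num : Int) :
    sum_arrangements num
      = (Nat.factorial ((PySem.Int.toChars num).length - 1) : Int)
          * ((PySem.Int.toChars num).map pyIntChar).sum
          * pvRep (PySem.Int.toChars num).length := by
  unfold sum_arrangements
  rw [pvLoopA]
  simp [PySem.List.length_pyRange_one]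

-- sum of a list with one index erased
lemma pvSum_eraseIdx :
    ∀ (l : List Int) (k : Nat), k < l.length → (l.eraseIdx k).sum = l.sum - l.getD k 0 := by
  intro l
  induction l with
  | nil => intro k h; simp at h
  | cons x xs ih =>
    intro k h
    cases k with
    | zero => simp
    | succ j =>
      simp only [List.eraseIdx_cons_succ, List.sum_cons, List.getD_cons_succ]
      rw [ih j (by simpa using h)]
      ring

-- prefix of a list read back through getD over range
lemma pvMap_getD_range (l : List Int) :
    (List.range l.length).map (fun j => l.getD j 0) = l := by
  apply List.ext_getElem
  · simp
  · intro i h1 h2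
    simp [List.getElem?_eq_getElem h2]

-- the closed forms B's recursion computes
def pvCntF (l : List Int) : Int := (Nat.factorial l.length : Int)
def pvTotF (l : List Int) : Int := pvK l.length * l.sum

-- every memo entry is correct
def pvInv (memo : PySem.Dict (List Int) (Int × Int)) : Prop :=
  ∀ k v, memo.get? k = some v → v = (pvCntF k, pvTotF k)

-- the loop body of B's recursion, named for the proofs
def pvBody (f : Nat) (l : List Int) (st : Int × Int × PySem.Dict (List Int) (Int × Int)) (i : Int) :
    Int × Int × PySem.Dict (List Int) (Int × Int) :=
  let r := sum_arrangements_rec f (l.eraseIdx i.toNat) st.2.2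
  (st.1 + r.1.1, st.2.1 + PySem.List.pyGetD l i 0 * 10 ^ (l.length - 1) * r.1.1 + r.1.2, r.2)

lemma pvRec_step (f : Nat) (l : List Int) (memo : PySem.Dict (List Int) (Int × Int))
    (hne : l ≠ []) (hget : memo.get? l = none) :
    sum_arrangements_rec (f + 1) l memo =
      (let st := (PySem.List.pyRange 0 (l.length : Int) 1).foldl (pvBody f l) ((0 : Int), (0 : Int), memo)
       ((st.1, st.2.1), st.2.2.insert l (st.1, st.2.1))) := by
  cases l with
  | nil => exact absurd rfl hne
  | cons x xs =>
    simp only [sum_arrangements_rec, List.isEmpty_cons, Bool.false_eq_true, if_false, hget]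
    rfl

lemma pvRec_cached (f : Nat) (l : List Int) (memo : PySem.Dict (List Int) (Int × Int))
    (v : Int × Int) (hne : l ≠ []) (hget : memo.get? l = some v) :
    sum_arrangements_rec (f + 1) l memo = (v, memo) := by
  cases l with
  | nil => exact absurd rfl hne
  | cons x xs =>
    simp only [sum_arrangements_rec, List.isEmpty_cons, Bool.false_eq_true, if_false, hget]

-- master invariant of B's memoised recursion
lemma pvRec_closed :
    ∀ (fuel : Nat) (l : List Int) (memo : PySem.Dict (List Int) (Int × Int)),
      l.length ≤ fuel → pvInv memo →
      (sum_arrangements_rec fuel l memo).1 = (pvCntF l, pvTotF l)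
        ∧ pvInv (sum_arrangements_rec fuel l memo).2 := by
  intro fuel
  induction fuel with
  | zero =>
    intro l memo h hinv
    have : l = [] := List.eq_nil_of_length_eq_zero (Nat.le_zero.mp h)
    subst this
    exact ⟨by simp [sum_arrangements_rec, pvCntF, pvTotF, pvK], by simpa [sum_arrangements_rec]⟩
  | succ f ih =>
    intro l memo h hinv
    by_cases hne : l = []
    · subst hne
      exact ⟨by simp [sum_arrangements_rec, pvCntF, pvTotF, pvK], by simpa [sum_arrangements_rec]⟩
    · obtain ⟨x, xs, hl⟩ : ∃ x xs, l = x :: xs := by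
        cases l with
        | nil => exact absurd rfl hne
        | cons a as => exact ⟨a, as, rfl⟩
      have hn1 : l.length = xs.length + 1 := by rw [hl]; simp
      clear hl
      set n : Nat := l.length with hn
      rcases hget : memo.get? l with _ | v
      · -- not cached: run the loop
        rw [pvRec_step f l memo hne hget]
        rw [show ((l.length : Int)) = ((n : Nat) : Int) from by rw [hn],
            PySem.List.pyRange_zero_nat n, List.foldl_map]
        set C : Int := (Nat.factorial (n - 1) : Int) with hC
        set K' : Int := pvK (n - 1) with hK'
        -- loop invariant over the first m indices
        have haux : ∀ m, m ≤ n →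
            (((List.range m).foldl (fun st (k : Nat) => pvBody f l st (k : Int)) ((0 : Int), (0 : Int), memo)).1
                = (m : Int) * C
              ∧ ((List.range m).foldl (fun st (k : Nat) => pvBody f l st (k : Int)) ((0 : Int), (0 : Int), memo)).2.1
                = C * (10 ^ (n - 1)) * (((List.range m).map (fun j => l.getD j 0)).sum)
                    + K' * ((m : Int) * l.sum - (((List.range m).map (fun j => l.getD j 0)).sum))
              ∧ pvInv ((List.range m).foldl (fun st (k : Nat) => pvBody f l st (k : Int)) ((0 : Int), (0 : Int), memo)).2.2) := by
          intro m
          induction m with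
          | zero => intro _; refine ⟨by simp, by simp, by simpa⟩
          | succ j ihm =>
            intro hj
            obtain ⟨h1, h2, h3⟩ := ihm (Nat.le_of_succ_le hj)
            have hjl : j < l.length := by rw [← hn]; omega
            rw [List.range_succ, List.foldl_append, List.foldl_cons, List.foldl_nil]
            set st := (List.range j).foldl (fun st (k : Nat) => pvBody f l st (k : Int)) ((0 : Int), (0 : Int), memo) with hst
            have hlen : (l.eraseIdx j).length = n - 1 := by
              rw [List.length_eraseIdx_of_lt hjl, hn]
            have hfuel : (l.eraseIdx j).length ≤ f := by rw [hlen]; omega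
            obtain ⟨hr1, hr2⟩ := ih (l.eraseIdx j) st.2.2 hfuel h3
            have hrv : (sum_arrangements_rec f (l.eraseIdx j) st.2.2).1
                = (C, K' * (l.sum - l.getD j 0)) := by
              rw [hr1]
              unfold pvCntF pvTotF
              rw [hlen, pvSum_eraseIdx l j hjl, hC, hK']
            have hcast : ((j : Int)).toNat = j := by simp
            simp only [pvBody, hcast, PySem.List.pyGetD_natCast]
            rw [hrv]
            refine ⟨?_, ?_, ?_⟩
            · simp only [h1]; push_cast; ring
            · simp only [h2, List.map_append, List.sum_append,
                List.map_cons, List.map_nil, List.sum_cons, List.sum_nil]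
              rw [← hn]
              push_cast
              ring
            · exact hr2
        obtain ⟨h1, h2, h3⟩ := haux n (le_refl n)
        rw [show (List.range n).map (fun j => l.getD j 0) = l from by rw [hn]; exact pvMap_getD_range l] at h2
        set st := (List.range n).foldl (fun st (k : Nat) => pvBody f l st (k : Int)) ((0 : Int), (0 : Int), memo) with hst
        have hres1 : st.1 = pvCntF l := by
          rw [h1, hC]
          unfold pvCntF
          rw [← hn, hn1]
          simp only [Nat.add_sub_cancel, Nat.factorial_succ]
          push_cast
          ring
        have hres2 : st.2.1 = pvTotF l := by
          rw [h2, hC, hK']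
          unfold pvTotF
          rw [← hn, hn1]
          simp only [Nat.add_sub_cancel, pvK]
          push_cast
          ring
        show (st.1, st.2.1) = (pvCntF l, pvTotF l) ∧ pvInv (st.2.2.insert l (st.1, st.2.1))
        refine ⟨by rw [hres1, hres2], ?_⟩
        -- the final insert stores exactly the closed-form pair
        intro k v hkv
        rw [PySem.Dict.get?_insert] at hkv
        by_cases hk : k = l
        · rw [if_pos hk] at hkv
          have hv : (st.1, st.2.1) = v := by injection hkv
          rw [hk, ← hv, hres1, hres2]
        · rw [if_neg hk] at hkv
          exact h3 k v hkv
      · -- cached: the invariant gives the stored value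
        rw [pvRec_cached f l memo v hne hget]
        exact ⟨hinv l v hget, hinv⟩

lemma pvB_closed (num : Int) :
    sum_arrangements_alt num
      = pvK (PySem.Int.toChars num).length * ((PySem.Int.toChars num).map pyIntChar).sum := by
  unfold sum_arrangements_alt
  have hinv : pvInv PySem.Dict.empty := by
    intro k v hkv
    rw [PySem.Dict.get?_empty] at hkv
    exact absurd hkv (by simp)
  obtain ⟨h1, _⟩ := pvRec_closed ((PySem.Int.toChars num).map pyIntChar).length
    ((PySem.Int.toChars num).map pyIntChar) PySem.Dict.empty (le_refl _) hinv
  show (sum_arrangements_rec ((PySem.Int.toChars num).map pyIntChar).length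
    ((PySem.Int.toChars num).map pyIntChar) PySem.Dict.empty).1.2 = _
  rw [h1]
  show pvTotF _ = _
  unfold pvTotF
  rw [List.length_map]

-- ===== VERDICT (by name: the statement is the Claim_ definition above) =====
theorem sum_arrangements_spec : Claim_equal_sum_arrangements := by
  intro num _ _
  unfold Spec_sum_arrangements
  rw [pvA_closed, pvB_closed, pvK_eq]
  ring
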